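-- pv_equiv track=rewrite | github.com/spropst4/Decoupling-Gcode | Aerotech_Checkerboard_CoreShell.py | setpress
-- ===== SOURCE A (Python) =====
-- def setpress(pressure):
--     # IMPORTS
--     from codecs import encode
--     from textwrap import wrap
--
--     pressure = str(pressure * 10)
--     length = len(pressure)
--     while length < 4:
--         pressure = "0" + pressure
--         length = len(pressure)
--
--     commandc = bytes(('08PS  ' + pressure), "utf-8")
--
--     # FIND CHECKSUM
--     startc = b'\x05\x02'
--     endc = b'\x03'
--
--     hexcommand = encode(commandc, "hex")  # encode should turn this into a hex rather than ascii
--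
--     hexcommand = hexcommand.decode("utf-8")  # decode should turn this into a string object rather than a bytes object
--
--     ####format for arduino#####
--     format_command = str(hexcommand)
--     format_command = '\\x'.join(format_command[i:i + 2] for i in range(0, len(format_command), 2))
--     format_command = '\\x'+format_command
--     ##########################
--
--     hexcommand = wrap(hexcommand,
--                       2)  # wrap should split the string into a horizontal array of strings of 2 characters each
--
--     # GETTING THE 8 BIT 2'S COMPLEMENT
--     decimalsum = 0
--     for i in hexcommand:  # get the decimal sum of the hex command
--         decimalsum = decimalsum + int(i, 16)
--     checksum = decimalsum % 256  # get the remainder of the decimal sum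
--     checksum = bin(checksum)  # turn into binary
--     checksum = checksum[2:]  # checksum is a string
--     while len(checksum) < 8:  # checksum must represents 8 bits of information
--         checksum = "0" + checksum
--     invert = ""
--     for i in checksum:  # binary sum must be inverted
--         if i == '0':
--             invert = invert + "1"
--         else:
--             invert = invert + "0"
--     invert = int(invert, 2)  # binary sum turned into decimal form
--     invert = invert + 1
--     # CHECKSUM HAS BEEN RETRIEVED IN DECIMAL FORM
--     checksum = invert
--     checksum = hex(checksum)  # checksum is in the format "0x##"
--     # CHECKSUM IS NOW IN ASCII FORM, don't be mislead by the hex function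
--     checksum = checksum[2:]
--     checksumarray = []
--     for i in checksum:  # must get alphabetical characters in uppercase for ascii to hex conversion
--         if i.isalpha():
--             i = i.upper()
--             checksumarray.append(i)
--         else:
--             checksumarray.append(i)
--     checksum = ""
--     for i in checksumarray:
--         checksum = checksum + i
--     # checksum is a string.
--     checksum = bytes(checksum, 'ascii')
--
--     ####format for arduino#####
--     hexchecksum = encode(checksum, 'hex')
--     hexchecksum = hexchecksum.decode("utf-8")  # decode should turn this into a string object rather than a bytes object
--     format_checksum = str(hexchecksum)  # format for arduino
--     format_checksum = '\\x'.join(format_checksum[i:i + 2] for i in range(0, len(format_checksum), 2))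
--     format_checksum = '\\x' + format_checksum
--
--     # SENDING OUT THE COMMAND
--     ##format for arduino####
--     finalcommand = ('\\x05\\x02') + format_command + format_checksum + str('\\x03')
--     finalcommand = finalcommand.strip('\r').strip('\n')
--     finalcommand = '"' + finalcommand + '"'
--     return finalcommand
-- ===== SOURCE B (Python) =====
-- def setpress(pressure):
--     s = str(pressure * 10).rjust(4, "0")
--     command = bytes("08PS  " + s, "utf-8")
--     checksum_val = 256 - sum(command) % 256  # == A's invert-and-add-one, including the 0 -> 256 case
--     body = "".join("\\x%02x" % b for b in command)
--     chk = "".join("\\x%02x" % ord(c) for c in format(checksum_val, "X"))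
--     return '"\\x05\\x02' + body + chk + '\\x03"'
-- ===== Notes on version B (the rewrite author's own statement) =====
-- stated objective: simpler
-- what changed: B computes the checksum arithmetically as the two's complement of the byte sum modulo one byte and formats each byte as an escaped hex pair in one pass, replacing A's hex-encode/re-parse summation, binary-string padding-and-inversion loop, and per-character uppercase/concat loops.
import Mathlib
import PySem

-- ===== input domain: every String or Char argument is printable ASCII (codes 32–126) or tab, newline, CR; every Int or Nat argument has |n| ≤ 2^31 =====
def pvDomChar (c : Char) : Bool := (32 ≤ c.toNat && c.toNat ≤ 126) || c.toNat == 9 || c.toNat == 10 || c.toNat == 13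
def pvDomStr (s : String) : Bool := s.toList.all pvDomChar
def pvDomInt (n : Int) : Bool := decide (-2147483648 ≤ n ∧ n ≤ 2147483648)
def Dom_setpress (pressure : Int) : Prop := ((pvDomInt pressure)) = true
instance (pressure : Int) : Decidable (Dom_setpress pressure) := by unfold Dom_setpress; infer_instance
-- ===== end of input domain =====

-- B replaces A's hex-pair re-parsing sum, binary-string bit-inversion loop and per-character loops by
-- direct byte arithmetic (256 - sum(bytes) % 256) and direct per-byte formatting (objective: simpler).

-- ===== PORT A =====

-- one lowercase hex digit (the characters codecs.encode(_, 'hex') emits)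
def aHexDigit (n : Nat) : Char := if n < 10 then Char.ofNat (48 + n) else Char.ofNat (97 + (n - 10))

-- the two hex characters codecs.encode(_, 'hex') produces for one byte
def aToHex2 (b : Nat) : List Char := [aHexDigit (b / 16), aHexDigit (b % 16)]

-- while length < 4: pressure = "0" + pressure  (each pass adds one char, so 4 passes of fuel suffice)
def aPadGo : Nat → List Char → List Char
  | 0, s => s
  | f + 1, s => if s.length < 4 then aPadGo f ('0' :: s) else s

def aPad (s : List Char) : List Char := aPadGo 4 s

-- while len(checksum) < 8: checksum = "0" + checksum
def aPad8Go : Nat → List Char → List Char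
  | 0, s => s
  | f + 1, s => if s.length < 8 then aPad8Go f ('0' :: s) else s

def aPad8 (s : List Char) : List Char := aPad8Go 8 s

-- both the range(0, len, 2) slice comprehension and textwrap.wrap(_, 2)
def aChunk2 (l : List Char) : List (List Char) :=
  match l with
  | [] => []
  | [a] => [[a]]
  | a :: b :: t => [a, b] :: aChunk2 t

def setpress (pressure : Int) : String :=
  let pressureS : List Char := aPad (PySem.Int.toChars (pressure * 10))
  -- bytes('08PS  ' + pressure, 'utf-8'): all characters are ASCII, so the bytes are the char codes
  let commandc : List Nat := (('0' :: '8' :: 'P' :: 'S' :: ' ' :: ' ' :: pressureS).map Char.toNat)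
  let hexcommand : List Char := commandc.flatMap aToHex2
  let format_command : List Char := '\\' :: 'x' :: PySem.Chars.join ['\\', 'x'] (aChunk2 hexcommand)
  -- int(i, 16) never raises here (the pairs are hex digits), so the .getD 0 default is never taken
  let decimalsum : Int := (aChunk2 hexcommand).foldl
      (fun acc i => acc + (PySem.Int.ofCharsBase? i 16).getD 0) 0
  let checksum0 : Int := PySem.Int.mod decimalsum 256
  let binS : List Char := (PySem.Int.toBinChars0b checksum0).drop 2   -- bin(checksum)[2:]
  let invertS : List Char := (aPad8 binS).foldl
      (fun inv i => inv ++ [if i = '0' then '1' else '0']) []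
  let invert : Int := (PySem.Int.ofCharsBase? invertS 2).getD 0 + 1
  -- hex(invert)[2:]; invert ≥ 1 here and hex() of a nonnegative int is '0x' ++ lowercase hex digits
  let checksumHex : List Char := ('0' :: 'x' :: Nat.toDigits 16 invert.toNat).drop 2
  let checksumarray : List Char := checksumHex.foldl
      (fun a i => a ++ [if PySem.Chars.isalpha i then PySem.Chars.upperChar i else i]) []
  let checksumS : List Char := checksumarray.foldl (fun s i => s ++ [i]) []
  let checksumBytes : List Nat := checksumS.map Char.toNat        -- bytes(checksum, 'ascii')
  let hexchecksum : List Char := checksumBytes.flatMap aToHex2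
  let format_checksum : List Char := '\\' :: 'x' :: PySem.Chars.join ['\\', 'x'] (aChunk2 hexchecksum)
  let finalcommand : List Char :=
    ['\\', 'x', '0', '5', '\\', 'x', '0', '2'] ++ format_command ++ format_checksum ++ ['\\', 'x', '0', '3']
  let stripped : List Char :=
    PySem.Chars.stripChars (PySem.Chars.stripChars finalcommand ['\r']) ['\n']
  String.mk ('"' :: stripped ++ ['"'])

-- ===== PORT B =====

-- one uppercase hex digit
def bHexDigitU (n : Nat) : Char := if n < 10 then Char.ofNat (48 + n) else Char.ofNat (65 + (n - 10))

-- format(n, 'X'): uppercase hex digits of n (fuel only makes the division recursion structural)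
def bHexUGo : Nat → Nat → List Char
  | 0, _ => []
  | f + 1, n => if n < 16 then [bHexDigitU n] else bHexUGo f (n / 16) ++ [bHexDigitU (n % 16)]

def bHexU (n : Nat) : List Char := bHexUGo (n + 1) n

-- "\\x%02x" % b  (lowercase hex of b, zero-padded to two digits, after '\x')
def bFmt (b : Nat) : List Char := '\\' :: 'x' :: PySem.Chars.zfill (Nat.toDigits 16 b) 2

def setpress_alt (pressure : Int) : String :=
  let s : List Char := PySem.Int.toChars (pressure * 10)
  let padded : List Char := List.replicate (4 - s.length) '0' ++ s      -- s.rjust(4, '0')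
  let command : List Nat := (('0' :: '8' :: 'P' :: 'S' :: ' ' :: ' ' :: padded).map Char.toNat)
  let checksumVal : Nat := 256 - command.sum % 256
  let body : List Char := command.flatMap bFmt
  let chk : List Char := (bHexU checksumVal).flatMap (fun c => bFmt c.toNat)
  String.mk ('"' :: (['\\', 'x', '0', '5', '\\', 'x', '0', '2'] ++ body ++ chk
      ++ ['\\', 'x', '0', '3']) ++ ['"'])

-- ===== PRECONDITION & SPEC =====
def Spec_setpress (pressure : Int) (out : String) : Prop := out = setpress_alt pressure
instance (pressure : Int) (out : String) : Decidable (Spec_setpress pressure out) := by unfold Spec_setpress; infer_instance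

-- ===== CLAIM (what is proved, stated in full; the proofs are below) =====
def Claim_equal_setpress : Prop := ∀ (pressure : Int), Dom_setpress pressure → Spec_setpress pressure (setpress pressure)

-- ===== LEMMAS AND PROOFS =====

theorem digitChar_prop (m : Nat) :
    (Nat.digitChar m).toNat < 256 ∧ Nat.digitChar m ≠ '\r' ∧ Nat.digitChar m ≠ '\n' := by
  by_cases h : m < 16
  · interval_cases m <;> refine ⟨by decide, by decide, by decide⟩
  · have : Nat.digitChar m = '*' := by
      unfold Nat.digitChar
      have h0 : ¬ m = 0 := by omega
      have h1 : ¬ m = 1 := by omega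
      have h2 : ¬ m = 2 := by omega
      have h3 : ¬ m = 3 := by omega
      have h4 : ¬ m = 4 := by omega
      have h5 : ¬ m = 5 := by omega
      have h6 : ¬ m = 6 := by omega
      have h7 : ¬ m = 7 := by omega
      have h8 : ¬ m = 8 := by omega
      have h9 : ¬ m = 9 := by omega
      have ha : ¬ m = 10 := by omega
      have hb : ¬ m = 11 := by omega
      have hc : ¬ m = 12 := by omega
      have hd : ¬ m = 13 := by omega
      have he : ¬ m = 14 := by omega
      have hf : ¬ m = 15 := by omega
      simp only [h0, h1, h2, h3, h4, h5, h6, h7, h8, h9, ha, hb, hc, hd, he, hf, if_false]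
    rw [this]; refine ⟨by decide, by decide, by decide⟩

theorem toDigitsCore_prop (P : Char → Prop) (hP : ∀ m, P (Nat.digitChar m)) (b : Nat) :
    ∀ (f n : Nat) (acc : List Char),
    (∀ c ∈ acc, P c) → ∀ c ∈ Nat.toDigitsCore b f n acc, P c := by
  intro f
  induction f with
  | zero => intro n acc h; simpa [Nat.toDigitsCore] using h
  | succ f ih =>
    intro n acc h c hc
    simp only [Nat.toDigitsCore] at hc
    split at hc
    · rcases List.mem_cons.mp hc with rfl | hmem
      · exact hP _
      · exact h c hmem
    · refine ih (n / b) _ ?_ c hc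
      intro d hd
      rcases List.mem_cons.mp hd with rfl | hmem
      · exact hP _
      · exact h d hmem

theorem toChars_lt (m : Int) : ∀ c ∈ PySem.Int.toChars m, c.toNat < 256 := by
  unfold PySem.Int.toChars Nat.toDigits
  split
  · intro c hc
    rcases List.mem_cons.mp hc with rfl | hmem
    · decide
    · exact toDigitsCore_prop (fun c => c.toNat < 256) (fun m => (digitChar_prop m).1) 10 _ _ _ (by simp) c hmem
  · exact toDigitsCore_prop (fun c => c.toNat < 256) (fun m => (digitChar_prop m).1) 10 _ _ _ (by simp)

theorem zfill_mem (cs : List Char) (w : Int) : ∀ c ∈ PySem.Chars.zfill cs w, c ∈ cs ∨ c = '0' := by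
  intro c hc
  unfold PySem.Chars.zfill at hc
  split at hc
  · exact Or.inl hc
  · split at hc
    · split at hc
      · rcases List.mem_cons.mp hc with rfl | hc
        · exact Or.inl (by simp)
        · rcases List.mem_append.mp hc with hc | hc
          · exact Or.inr (List.eq_of_mem_replicate hc)
          · exact Or.inl (by simp [hc])
      · rcases List.mem_append.mp hc with hc | hc
        · exact Or.inr (List.eq_of_mem_replicate hc)
        · exact Or.inl hc
    · exact Or.inr (List.eq_of_mem_replicate hc)

theorem bFmt_no_crlf (b : Nat) : ∀ c ∈ bFmt b, c ≠ '\r' ∧ c ≠ '\n' := by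
  intro c hc
  rcases List.mem_cons.mp hc with rfl | hc
  · exact ⟨by decide, by decide⟩
  rcases List.mem_cons.mp hc with rfl | hc
  · exact ⟨by decide, by decide⟩
  rcases zfill_mem _ _ c hc with hc | rfl
  · exact toDigitsCore_prop (fun c => c ≠ '\r' ∧ c ≠ '\n')
      (fun m => ⟨(digitChar_prop m).2.1, (digitChar_prop m).2.2⟩) 16 _ _ _ (by simp) c hc
  · exact ⟨by decide, by decide⟩

theorem aPadGo_eq : ∀ (f : Nat) (s : List Char), 4 ≤ s.length + f →
    aPadGo f s = List.replicate (4 - s.length) '0' ++ s := by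
  intro f
  induction f with
  | zero =>
    intro s hf
    have : 4 - s.length = 0 := by omega
    simp [aPadGo, this]
  | succ f ih =>
    intro s hf
    by_cases hl : s.length < 4
    · obtain ⟨k, hk⟩ : ∃ k, 4 - s.length = k + 1 := ⟨4 - s.length - 1, by omega⟩
      rw [aPadGo, if_pos hl, ih ('0' :: s) (by simp; omega),
          show 4 - ('0' :: s).length = k from by simp; omega, hk, List.replicate_succ',
          List.append_assoc, List.singleton_append]
    · rw [aPadGo, if_neg hl]
      have : 4 - s.length = 0 := by omega
      simp [this]

theorem aPad_eq (s : List Char) : aPad s = List.replicate (4 - s.length) '0' ++ s :=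
  aPadGo_eq 4 s (by omega)

set_option maxRecDepth 10000 in
set_option maxHeartbeats 2000000 in
theorem parse_pair : ∀ b : Fin 256, (PySem.Int.ofCharsBase? (aToHex2 b.val) 16).getD 0 = (b.val : Int) := by
  decide

set_option maxRecDepth 10000 in
set_option maxHeartbeats 2000000 in
theorem fmt_pair : ∀ b : Fin 256, bFmt b.val = '\\' :: 'x' :: aToHex2 b.val := by decide

theorem chunk2_flatMap (bs : List Nat) : aChunk2 (bs.flatMap aToHex2) = bs.map aToHex2 := by
  induction bs with
  | nil => rfl
  | cons b t ih => simpa [aToHex2, aChunk2] using ih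

theorem sum_fold (bs : List Nat) (h : ∀ b ∈ bs, b < 256) : ∀ acc : Int,
    (bs.map aToHex2).foldl (fun acc i => acc + (PySem.Int.ofCharsBase? i 16).getD 0) acc
      = acc + (bs.sum : Int) := by
  induction bs with
  | nil => intro acc; simp
  | cons b t ih =>
    intro acc
    have hb : b < 256 := h b (by simp)
    rw [List.map_cons, List.foldl_cons, parse_pair ⟨b, hb⟩,
      ih (fun x hx => h x (by simp [hx])) (acc + (b : Int))]
    push_cast
    simp [List.sum_cons]
    ring

theorem join_fmt : ∀ (b : Nat) (bs : List Nat),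
    ('\\' :: 'x' :: PySem.Chars.join ['\\', 'x'] ((b :: bs).map aToHex2))
      = (b :: bs).flatMap (fun x => '\\' :: 'x' :: aToHex2 x) := by
  intro b bs
  induction bs generalizing b with
  | nil => simp [PySem.Chars.join_singleton, aToHex2]
  | cons b' t ih =>
    simp only [List.map_cons] at *
    rw [PySem.Chars.join_cons_cons]
    simp only [List.flatMap_cons] at *
    rw [← ih b']
    simp [aToHex2]

-- the whole '\x'-join pipeline of A equals B's per-byte formatting
theorem fmt_eq (bs : List Nat) (hne : bs ≠ []) (h : ∀ x ∈ bs, x < 256) :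
    ('\\' :: 'x' :: PySem.Chars.join ['\\', 'x'] (bs.map aToHex2))
      = bs.flatMap bFmt := by
  cases bs with
  | nil => exact absurd rfl hne
  | cons b t =>
    rw [join_fmt]
    refine List.flatMap_congr (fun x hx => ?_)
    rw [fmt_pair ⟨x, h x hx⟩]

-- A's mod / bin / pad-to-8 / invert / int(_, 2) / +1 pipeline is 256 - c on every residue c
set_option maxRecDepth 10000 in
set_option maxHeartbeats 4000000 in
theorem core_eq : ∀ c : Fin 256,
    ((PySem.Int.ofCharsBase?
        ((aPad8 ((PySem.Int.toBinChars0b (c.val : Int)).drop 2)).foldl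
          (fun inv i => inv ++ [if i = '0' then '1' else '0']) []) 2).getD 0 + 1 : Int)
      = 256 - (c.val : Int) := by
  decide

-- A's hex + uppercase loop is B's uppercase-hex rendering, for every checksum value 0..256
set_option maxRecDepth 10000 in
set_option maxHeartbeats 4000000 in
theorem hexupper_eq : ∀ v : Fin 257,
    (('0' :: 'x' :: Nat.toDigits 16 v.val).drop 2).foldl
        (fun a i => a ++ [if PySem.Chars.isalpha i then PySem.Chars.upperChar i else i]) []
      = bHexU v.val := by
  decide

theorem bHexUGo_chars : ∀ (f v : Nat), ∀ c ∈ bHexUGo f v, ∃ m : Nat, m < 16 ∧ c = bHexDigitU m := by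
  intro f
  induction f with
  | zero => intro v c hc; simp [bHexUGo] at hc
  | succ f ih =>
    intro v c hc
    rw [bHexUGo] at hc
    split at hc
    · simp only [List.mem_singleton] at hc
      exact ⟨v, by omega, hc⟩
    · rcases List.mem_append.mp hc with hmem | hmem
      · exact ih (v / 16) c hmem
      · simp only [List.mem_singleton] at hmem
        exact ⟨v % 16, Nat.mod_lt _ (by omega), hmem⟩

set_option maxRecDepth 10000 in
theorem bHexDigitU_lt : ∀ m : Fin 16, (bHexDigitU m.val).toNat < 256 := by decide

theorem bHexU_lt (v : Nat) : ∀ c ∈ bHexU v, c.toNat < 256 := by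
  intro c hc
  obtain ⟨m, hm, rfl⟩ := bHexUGo_chars _ v c hc
  exact bHexDigitU_lt ⟨m, hm⟩

theorem bHexU_ne_nil (v : Nat) : bHexU v ≠ [] := by
  show bHexUGo (v + 1) v ≠ []
  rw [bHexUGo]
  split <;> simp

theorem strip_id (l : List Char) (c : Char) (h : ∀ x ∈ l, x ≠ c) :
    PySem.Chars.stripChars l [c] = l := by
  have hdw : ∀ m : List Char, (∀ x ∈ m, x ≠ c) → List.dropWhile (fun x => [c].contains x) m = m := by
    intro m hm
    rw [List.dropWhile_eq_self_iff]
    intro hl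
    have := hm m[0] (List.getElem_mem hl)
    simp only [List.contains_cons, List.contains_nil, Bool.or_false, beq_iff_eq]
    exact fun e => (this e).elim
  show (List.dropWhile (fun x => [c].contains x)
      (List.dropWhile (fun x => [c].contains x) l).reverse).reverse = l
  rw [hdw l h, hdw l.reverse (fun x hx => h x (List.mem_reverse.mp hx)), List.reverse_reverse]

theorem flatMap_fmt_no_crlf (bs : List Nat) :
    ∀ x ∈ bs.flatMap bFmt, x ≠ '\r' ∧ x ≠ '\n' := by
  intro x hx
  obtain ⟨b, hb, hmem⟩ := List.mem_flatMap.mp hx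
  exact bFmt_no_crlf b x hmem

-- ===== VERDICT (by name: the statement is the Claim_ definition above) =====
set_option maxRecDepth 10000 in
set_option maxHeartbeats 2000000 in
theorem setpress_spec : Claim_equal_setpress := by
  intro pressure _
  unfold Spec_setpress setpress setpress_alt
  dsimp only
  rw [aPad_eq]
  set s : List Char := PySem.Int.toChars (pressure * 10) with hs
  set padded : List Char := List.replicate (4 - s.length) '0' ++ s with hpadded
  set command : List Nat := (('0' :: '8' :: 'P' :: 'S' :: ' ' :: ' ' :: padded).map Char.toNat)
    with hcommand
  have hbytes : ∀ b ∈ command, b < 256 := by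
    intro b hb
    rw [hcommand] at hb
    obtain ⟨ch, hch, rfl⟩ := List.mem_map.mp hb
    simp only [List.mem_cons] at hch
    rcases hch with rfl | rfl | rfl | rfl | rfl | rfl | h
    · decide
    · decide
    · decide
    · decide
    · decide
    · decide
    · rw [hpadded] at h
      rcases List.mem_append.mp h with h | h
      · rw [List.eq_of_mem_replicate h]; decide
      · exact toChars_lt _ ch h
  have hne : command ≠ [] := by rw [hcommand]; simp
  set c : Nat := command.sum % 256 with hc
  have hclt : c < 256 := Nat.mod_lt _ (by omega)
  rw [chunk2_flatMap, sum_fold command hbytes 0, zero_add]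
  have hmod : PySem.Int.mod ((command.sum : Nat) : Int) 256 = ((c : Nat) : Int) := by
    rw [hc]; exact_mod_cast PySem.Int.mod_natCast command.sum 256
  rw [hmod, core_eq ⟨c, hclt⟩]
  have hV : ((256 - ((c : Nat) : Int))).toNat = 256 - c := by omega
  rw [hV, hexupper_eq ⟨256 - c, by omega⟩, PySem.List.foldl_append_singleton, List.nil_append]
  dsimp only
  have hchkbytes : ∀ b ∈ (bHexU (256 - c)).map Char.toNat, b < 256 := by
    intro b hb
    obtain ⟨ch, hch, rfl⟩ := List.mem_map.mp hb
    exact bHexU_lt _ ch hch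
  rw [chunk2_flatMap, fmt_eq command hne hbytes,
      fmt_eq ((bHexU (256 - c)).map Char.toNat) (by simp [bHexU_ne_nil]) hchkbytes]
  have hnocrlf : ∀ x ∈ (['\\', 'x', '0', '5', '\\', 'x', '0', '2'] ++ command.flatMap bFmt
      ++ ((bHexU (256 - c)).map Char.toNat).flatMap bFmt ++ ['\\', 'x', '0', '3']),
      x ≠ '\r' ∧ x ≠ '\n' := by
    intro x hx
    rcases List.mem_append.mp hx with hx | hx
    · rcases List.mem_append.mp hx with hx | hx
      · rcases List.mem_append.mp hx with hx | hx
        · simp only [List.mem_cons, List.not_mem_nil, or_false] at hx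
          rcases hx with rfl | rfl | rfl | rfl | rfl | rfl | rfl | rfl <;> exact ⟨by decide, by decide⟩
        · exact flatMap_fmt_no_crlf command x hx
      · exact flatMap_fmt_no_crlf _ x hx
    · simp only [List.mem_cons, List.not_mem_nil, or_false] at hx
      rcases hx with rfl | rfl | rfl | rfl <;> exact ⟨by decide, by decide⟩
  rw [strip_id _ _ (fun x hx => (hnocrlf x (by simpa using hx)).1),
      strip_id _ _ (fun x hx => (hnocrlf x (by simpa using hx)).2)]
  simp only [List.flatMap_map]
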